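-- pv_equiv track=rewrite | github.com/Prateekbit05/WEEK_8-LLM_FINE_TUNING | DAY_5_CAPSTONE_LOCAL_LLM_API/deploy/model_loader.py | clean_generated_text
-- ===== SOURCE A (Python) =====
-- CUT_MARKERS = [
--     "\nUser:", "\nHuman:", "\nSystem:",
--     "\n\nUser:", "\n\nHuman:", "\n\nSystem:",
--     "\n<|user|>", "\n<|system|>",
--     "\n<|im_start|>user", "\n<|im_start|>system",
--     "\n### User:", "\n### System:",
-- ]
--
-- ARTIFACTS = [
--     "<|im_end|>", "<|im_start|>", "</s>", "<s>",
--     "<|system|>", "<|user|>", "<|assistant|>",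
--     "[INST]", "[/INST]", "<<SYS>>", "<</SYS>>",
--     "<|endoftext|>", "<|im_start|>assistant",
--     "### Assistant:", "### User:", "### System:",
-- ]
--
-- def clean_generated_text(text: str) -> str:
--     """Remove artifacts and cut at fake role markers"""
--     if not text:
--         return ""
--
--     for artifact in ARTIFACTS:
--         text = text.replace(artifact, "")
--
--     for marker in CUT_MARKERS:
--         idx = text.find(marker)
--         if idx > 0:
--             text = text[:idx]
--
--     text_lower = text.lower()
--     for marker in ["\nuser:", "\nhuman:", "\nsystem:"]:
--         idx = text_lower.find(marker)
--         if idx > 0: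
--             text = text[:idx]
--
--     return text.strip()
-- ===== SOURCE B (Python) =====
-- CUT_MARKERS = [
--     "\nUser:", "\nHuman:", "\nSystem:",
--     "\n\nUser:", "\n\nHuman:", "\n\nSystem:",
--     "\n<|user|>", "\n<|system|>",
--     "\n<|im_start|>user", "\n<|im_start|>system",
--     "\n### User:", "\n### System:",
-- ]
--
-- ARTIFACTS = [
--     "<|im_end|>", "<|im_start|>", "</s>", "<s>",
--     "<|system|>", "<|user|>", "<|assistant|>",
--     "[INST]", "[/INST]", "<<SYS>>", "<</SYS>>",
--     "<|endoftext|>", "<|im_start|>assistant",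
--     "### Assistant:", "### User:", "### System:",
-- ]
--
-- def clean_generated_text(text: str) -> str:
--     """Remove artifacts and cut at fake role markers"""
--     for artifact in ARTIFACTS:
--         text = text.replace(artifact, "")
--
--     lower = text.lower()
--     candidates = [i for i in
--                   [text.find(m) for m in CUT_MARKERS] +
--                   [lower.find(m) for m in ("\nuser:", "\nhuman:", "\nsystem:")]
--                   if i > 0]
--     if candidates:
--         text = text[:min(candidates)]
--
--     return text.strip()
-- ===== Notes on version B (the rewrite author's own statement) =====
-- stated objective: alternative
-- what changed: A's two sequential find-and-truncate loops over the marker lists are replaced by a single gather of all candidate cut indices (exact markers on the text, case-insensitive markers on its lowercase image, keeping only indices > 0) followed by one slice at their minimum; the artifact-removal pass and final strip are kept.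
import Mathlib
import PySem

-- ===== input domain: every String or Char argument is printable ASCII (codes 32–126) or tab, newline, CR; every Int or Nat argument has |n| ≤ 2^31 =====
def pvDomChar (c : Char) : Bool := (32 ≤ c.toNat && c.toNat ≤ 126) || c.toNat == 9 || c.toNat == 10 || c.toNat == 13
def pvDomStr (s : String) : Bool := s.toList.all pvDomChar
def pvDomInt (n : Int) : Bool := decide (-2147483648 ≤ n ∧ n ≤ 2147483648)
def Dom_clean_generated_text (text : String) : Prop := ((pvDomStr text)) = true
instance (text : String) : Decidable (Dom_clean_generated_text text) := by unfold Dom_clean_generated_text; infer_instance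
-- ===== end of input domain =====

-- B replaces A's two sequential find-and-truncate loops by one gather of all candidate
-- cut indices followed by a single minimum cut (objective: alternative decomposition).

def pvCutMarkers : List String := [
  "\nUser:", "\nHuman:", "\nSystem:",
  "\n\nUser:", "\n\nHuman:", "\n\nSystem:",
  "\n<|user|>", "\n<|system|>",
  "\n<|im_start|>user", "\n<|im_start|>system",
  "\n### User:", "\n### System:"]

def pvArtifacts : List String := [
  "<|im_end|>", "<|im_start|>", "</s>", "<s>",
  "<|system|>", "<|user|>", "<|assistant|>",
  "[INST]", "[/INST]", "<<SYS>>", "<</SYS>>",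
  "<|endoftext|>", "<|im_start|>assistant",
  "### Assistant:", "### User:", "### System:"]

def pvCiMarkers : List String := ["\nuser:", "\nhuman:", "\nsystem:"]

-- ===== PORT A =====
def clean_generated_text (text : String) : String :=
  if text = "" then "" else
    let t1 := pvArtifacts.foldl (fun s a => PySem.Str.replace s a "") text
    let t2 := pvCutMarkers.foldl (fun s m =>
        let idx := PySem.Str.find s m
        if 0 < idx then PySem.Str.slice s none (some idx) else s) t1
    let tl := PySem.Str.lower t2
    let t3 := pvCiMarkers.foldl (fun s m =>
        let idx := PySem.Str.find tl m
        if 0 < idx then PySem.Str.slice s none (some idx) else s) t2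
    PySem.Str.strip t3

-- ===== PORT B =====
def clean_generated_text_alt (text : String) : String :=
  let t1 := pvArtifacts.foldl (fun s a => PySem.Str.replace s a "") text
  let lw := PySem.Str.lower t1
  let cands := (pvCutMarkers.map (fun m => PySem.Str.find t1 m) ++
                pvCiMarkers.map (fun m => PySem.Str.find lw m)).filter (fun i => 0 < i)
  let t2 := match PySem.List.min? cands (fun x => x) with
            | some c => PySem.Str.slice t1 none (some c)
            | none => t1
  PySem.Str.strip t2

-- ===== PRECONDITION & SPEC =====
def Spec_clean_generated_text (text : String) (out : String) : Prop := out = clean_generated_text_alt text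
instance (text : String) (out : String) : Decidable (Spec_clean_generated_text text out) := by unfold Spec_clean_generated_text; infer_instance

-- ===== CLAIM (what is proved, stated in full; the proofs are below) =====
def Claim_equal_clean_generated_text : Prop := ∀ (text : String), Dom_clean_generated_text text → Spec_clean_generated_text text (clean_generated_text text)

-- ===== LEMMAS AND PROOFS =====

-- Chars-level images of the marker lists
def pvCutMarkersC : List (List Char) := pvCutMarkers.map String.toList
def pvCiMarkersC : List (List Char) := pvCiMarkers.map String.toList

-- marker shape facts
def pvNlClosed (m : List Char) : Prop :=
  ∀ k, k < m.length → m.getD k ' ' = '\n' → ∀ j, j ≤ k → m.getD j ' ' = '\n'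

def pvGoodExact (m : List Char) : Prop := m ≠ [] ∧ m.getD 0 ' ' = '\n' ∧ pvNlClosed m

def pvGoodCi (m : List Char) : Prop := m ≠ [] ∧ ∀ k, 1 ≤ k → k < m.length → m.getD k ' ' ≠ '\n'

lemma pvGoodExact_all : ∀ m ∈ pvCutMarkersC, pvGoodExact m := by
  unfold pvCutMarkersC pvCutMarkers pvGoodExact pvNlClosed; decide
lemma pvGoodCi_all : ∀ m ∈ pvCiMarkersC, pvGoodCi m := by
  unfold pvCiMarkersC pvCiMarkers pvGoodCi; decide

lemma pv_occ_getD (t m : List Char) (i k : Nat) (h : m <+: t.drop i) (hk : k < m.length) :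
    t.getD (i + k) ' ' = m.getD k ' ' := by
  obtain ⟨r, hr⟩ := h
  rw [List.getD_eq_getElem?_getD, List.getD_eq_getElem?_getD, ← List.getElem?_drop, ← hr,
    List.getElem?_append_left hk]

lemma pv_occ_len (t m : List Char) (i : Nat) (hi : i ≤ t.length) (h : m <+: t.drop i) :
    i + m.length ≤ t.length := by
  have h1 := h.length_le
  simp [List.length_drop] at h1
  omega

lemma pv_find_nonneg (s m : List Char) (i : Nat) (hocc : m <+: s.drop i) :
    0 ≤ PySem.Chars.find s m := by
  rw [PySem.Chars.find_nonneg_iff]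
  exact (hocc.isInfix).trans (List.drop_suffix i s).isInfix

lemma pv_find_eq (s m : List Char) (i : Nat) (hocc : m <+: s.drop i)
    (hmin : ∀ j, j < i → ¬ m <+: s.drop j) : PySem.Chars.find s m = i := by
  have h0 := pv_find_nonneg s m i hocc
  obtain ⟨hocc', hmin'⟩ := PySem.Chars.find_spec h0
  have h1 : ¬ (PySem.Chars.find s m).toNat < i := fun h => hmin _ h hocc'
  have h2 : ¬ i < (PySem.Chars.find s m).toNat := fun h => hmin' i h hocc
  omega

lemma pv_find_take (s m : List Char) (c : Nat) :
    PySem.Chars.find (s.take c) m =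
      if 0 ≤ PySem.Chars.find s m ∧ (PySem.Chars.find s m).toNat + m.length ≤ c
      then PySem.Chars.find s m else -1 := by
  by_cases hm : m = []
  · subst hm
    simp [PySem.Chars.find_nil]
  split_ifs with h
  · obtain ⟨h0, hfit⟩ := h
    obtain ⟨hocc, hmin⟩ := PySem.Chars.find_spec h0
    set f := (PySem.Chars.find s m).toNat with hf
    have hocc' : m <+: (s.take c).drop f := by
      rw [List.drop_take]
      rw [List.prefix_take_iff]
      exact ⟨hocc, by omega⟩
    have hmin' : ∀ j, j < f → ¬ m <+: (s.take c).drop j := by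
      intro j hj hpre
      rw [List.drop_take, List.prefix_take_iff] at hpre
      exact hmin j hj hpre.1
    have := pv_find_eq (s.take c) m f hocc' hmin'
    omega
  · rw [PySem.Chars.find_eq_neg_one_iff]
    intro hinf
    have : PySem.Chars.isIn m (s.take c) = true := by
      by_contra hF
      rw [Bool.not_eq_true, PySem.Chars.isIn_eq_false_iff] at hF
      exact hF hinf
    obtain ⟨j, hj⟩ := (PySem.Chars.exists_prefix_drop_iff_isIn m (s.take c)).mpr this
    rw [List.drop_take, List.prefix_take_iff] at hj
    obtain ⟨hj1, hj2⟩ := hj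
    have h0 := pv_find_nonneg s m j hj1
    obtain ⟨hocc, hmin⟩ := PySem.Chars.find_spec h0
    have hle : (PySem.Chars.find s m).toNat ≤ j := by
      by_contra hlt
      exact hmin j (by omega) hj1
    have hmlen : 0 < m.length := by
      cases m with
      | nil => exact absurd rfl hm
      | cons a l => simp
    exact h ⟨h0, by omega⟩

lemma pv_dropWhile_all (p : Char → Bool) (v : List Char) (h : ∀ c ∈ v, p c = true) :
    List.dropWhile p v = [] := by
  rw [List.dropWhile_eq_nil_iff]; exact fun x hx => h x hx

lemma pv_strip_append (u v : List Char) (h : ∀ c ∈ v, PySem.Chars.isspace c = true) :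
    PySem.Chars.strip (u ++ v) = PySem.Chars.strip u := by
  have hv : List.dropWhile PySem.Chars.isspace v = [] := pv_dropWhile_all _ _ h
  have hvr : List.dropWhile PySem.Chars.isspace v.reverse = [] :=
    pv_dropWhile_all _ _ (fun c hc => h c (List.mem_reverse.mp hc))
  simp only [PySem.Chars.strip, PySem.Chars.lstrip, PySem.Chars.rstrip]
  rw [List.dropWhile_append, hv]
  split_ifs with he
  · rw [List.isEmpty_iff] at he
    rw [he]
  · rw [List.reverse_append, List.dropWhile_append, hvr]
    simp

def pvCutFoldC (L : List (List Char)) (s : List Char) : List Char :=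
  L.foldl (fun s m =>
    let idx := PySem.Chars.find s m
    if 0 < idx then PySem.Chars.slice s none (some idx) else s) s

def pvCiFoldC (tl : List Char) (L : List (List Char)) (s : List Char) : List Char :=
  L.foldl (fun s m =>
    let idx := PySem.Chars.find tl m
    if 0 < idx then PySem.Chars.slice s none (some idx) else s) s

lemma pv_slice_take (s : List Char) (f : Int) (hf : 0 ≤ f) :
    PySem.Chars.slice s none (some f) = s.take f.toNat := by
  simp [PySem.Chars.slice_eq_listSlice, PySem.List.slice_to _ hf]

lemma pv_cutFold_spec (t : List Char) (L : List (List Char)) (c : Nat)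
    (hgood : ∀ m ∈ L, pvGoodExact m)
    (hc : c ≤ t.length) (hb : c = t.length ∨ t.getD c ' ' = '\n') :
    ∃ c', pvCutFoldC L (t.take c) = t.take c' ∧ c' ≤ c ∧
      (c' = t.length ∨ t.getD c' ' ' = '\n') ∧
      (c' = c ∨ ∃ m ∈ L, 0 < PySem.Chars.find t m ∧ c' = (PySem.Chars.find t m).toNat) ∧
      (∀ m ∈ L, 0 < PySem.Chars.find t m →
        c' ≤ (PySem.Chars.find t m).toNat ∨
        ∀ i, (PySem.Chars.find t m).toNat ≤ i → i < c' → t.getD i ' ' = '\n') := by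
  induction L generalizing c with
  | nil => exact ⟨c, rfl, le_refl c, hb, Or.inl rfl, by simp⟩
  | cons m L ih =>
    obtain ⟨hmne, hm0, hmcl⟩ := hgood m (List.mem_cons_self)
    have hgood' : ∀ m' ∈ L, pvGoodExact m' := fun m' hm' => hgood m' (List.mem_cons_of_mem _ hm')
    have hmlen : 0 < m.length := List.length_pos_of_ne_nil hmne
    have hFle := PySem.Chars.find_le_length t m
    have hstep : pvCutFoldC (m :: L) (t.take c) =
        pvCutFoldC L (let idx := PySem.Chars.find (t.take c) m;
          if 0 < idx then PySem.Chars.slice (t.take c) none (some idx) else t.take c) := rfl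
    rw [pv_find_take] at hstep
    by_cases hfit : 0 ≤ PySem.Chars.find t m ∧ (PySem.Chars.find t m).toNat + m.length ≤ c
    · rw [if_pos hfit] at hstep
      obtain ⟨h0, hfitc⟩ := hfit
      obtain ⟨hocc, hmin⟩ := PySem.Chars.find_spec h0
      by_cases hpos : 0 < PySem.Chars.find t m
      · -- cut to F.toNat
        simp only [if_pos hpos] at hstep
        rw [pv_slice_take _ _ h0, List.take_take,
          min_eq_left (by omega)] at hstep
        have hbnd : t.getD (PySem.Chars.find t m).toNat ' ' = '\n' := by
          have h00 := pv_occ_getD t m (PySem.Chars.find t m).toNat 0 hocc hmlen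
          rw [Nat.add_zero] at h00
          rw [h00]; exact hm0
        obtain ⟨c', hres, hle, hbd, horig, hprops⟩ :=
          ih (PySem.Chars.find t m).toNat hgood' (by omega) (Or.inr hbnd)
        refine ⟨c', by rw [hstep]; exact hres, by omega, hbd, ?_, ?_⟩
        · rcases horig with h | ⟨m', hm', hp', he'⟩
          · exact Or.inr ⟨m, List.mem_cons_self, hpos, h⟩
          · exact Or.inr ⟨m', List.mem_cons_of_mem _ hm', hp', he'⟩
        · intro m'' hmem hp
          rcases List.mem_cons.mp hmem with rfl | hmem'
          · exact Or.inl hle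
          · exact hprops m'' hmem' hp
      · -- F = 0, no cut
        simp only [if_neg hpos] at hstep
        obtain ⟨c', hres, hle, hbd, horig, hprops⟩ := ih c hgood' hc hb
        refine ⟨c', by rw [hstep]; exact hres, hle, hbd, ?_, ?_⟩
        · rcases horig with h | ⟨m', hm', hp', he'⟩
          · exact Or.inl h
          · exact Or.inr ⟨m', List.mem_cons_of_mem _ hm', hp', he'⟩
        · intro m'' hmem hp
          rcases List.mem_cons.mp hmem with rfl | hmem'
          · exact absurd hp hpos
          · exact hprops m'' hmem' hp
    · rw [if_neg hfit] at hstep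
      norm_num at hstep
      obtain ⟨c', hres, hle, hbd, horig, hprops⟩ := ih c hgood' hc hb
      refine ⟨c', by rw [hstep]; exact hres, hle, hbd, ?_, ?_⟩
      · rcases horig with h | ⟨m', hm', hp', he'⟩
        · exact Or.inl h
        · exact Or.inr ⟨m', List.mem_cons_of_mem _ hm', hp', he'⟩
      · intro m'' hmem hp
        rcases List.mem_cons.mp hmem with rfl | hmem'
        · -- the straddle analysis
          have h0 : (0:Int) ≤ PySem.Chars.find t m'' := le_of_lt hp
          have hnofit : c < (PySem.Chars.find t m'').toNat + m''.length := by
            by_contra hcon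
            exact hfit ⟨h0, by omega⟩
          by_cases hcf : c ≤ (PySem.Chars.find t m'').toNat
          · exact Or.inl (by omega)
          · right
            intro i hi1 hi2
            obtain ⟨hocc, hmin⟩ := PySem.Chars.find_spec h0
            have hlen : (PySem.Chars.find t m'').toNat + m''.length ≤ t.length := by
              have := pv_occ_len t m'' (PySem.Chars.find t m'').toNat (by omega) hocc
              omega
            have hbc : t.getD c ' ' = '\n' := by
              rcases hb with h | h
              · omega
              · exact h
            set F := (PySem.Chars.find t m'').toNat with hF
            have hk0 : t.getD (F + (c - F)) ' ' = m''.getD (c - F) ' ' :=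
              pv_occ_getD t m'' F (c - F) hocc (by omega)
            have hmk0 : m''.getD (c - F) ' ' = '\n' := by
              rw [← hk0]
              have : F + (c - F) = c := by omega
              rw [this]; exact hbc
            have hall := hmcl (c - F) (by omega) hmk0
            have hij : t.getD (F + (i - F)) ' ' = m''.getD (i - F) ' ' :=
              pv_occ_getD t m'' F (i - F) hocc (by omega)
            have : F + (i - F) = i := by omega
            rw [this] at hij
            rw [hij]
            exact hall (i - F) (by omega)
        · exact hprops m'' hmem' hp

lemma pv_lower_length (t : List Char) : (PySem.Chars.lower t).length = t.length := by
  simp [PySem.Chars.lower]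

lemma pv_lower_getD_nl (t : List Char) (i : Nat) (hi : i < t.length)
    (h : t.getD i ' ' = '\n') : (PySem.Chars.lower t).getD i ' ' = '\n' := by
  rw [List.getD_eq_getElem?_getD] at h ⊢
  simp only [PySem.Chars.lower, List.getElem?_map]
  rw [List.getElem?_eq_getElem hi] at h ⊢
  simp only [Option.map_some, Option.getD_some] at h ⊢
  rw [h]
  decide

lemma pv_ciFold_spec (t : List Char) (c1 : Nat) (hc1 : c1 ≤ t.length)
    (hb : c1 = t.length ∨ t.getD c1 ' ' = '\n')
    (L : List (List Char)) (hgood : ∀ m ∈ L, pvGoodCi m) (c : Nat) (hc : c ≤ c1) :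
    ∃ c2, pvCiFoldC ((PySem.Chars.lower t).take c1) L (t.take c) = t.take c2 ∧ c2 ≤ c ∧
      (c2 = c ∨ ∃ m ∈ L, 0 < PySem.Chars.find (PySem.Chars.lower t) m ∧
        c2 = (PySem.Chars.find (PySem.Chars.lower t) m).toNat) ∧
      (∀ m ∈ L, 0 < PySem.Chars.find (PySem.Chars.lower t) m →
        c2 ≤ (PySem.Chars.find (PySem.Chars.lower t) m).toNat) := by
  induction L generalizing c with
  | nil => exact ⟨c, rfl, le_refl c, Or.inl rfl, by simp⟩
  | cons m L ih =>
    obtain ⟨hmne, hmnl⟩ := hgood m List.mem_cons_self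
    have hgood' : ∀ m' ∈ L, pvGoodCi m' := fun m' hm' => hgood m' (List.mem_cons_of_mem _ hm')
    have hmlen : 0 < m.length := List.length_pos_of_ne_nil hmne
    have hstep : pvCiFoldC ((PySem.Chars.lower t).take c1) (m :: L) (t.take c) =
        pvCiFoldC ((PySem.Chars.lower t).take c1) L
          (let idx := PySem.Chars.find ((PySem.Chars.lower t).take c1) m;
           if 0 < idx then PySem.Chars.slice (t.take c) none (some idx) else t.take c) := rfl
    rw [pv_find_take] at hstep
    set G := PySem.Chars.find (PySem.Chars.lower t) m with hG
    by_cases hfit : 0 ≤ G ∧ G.toNat + m.length ≤ c1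
    · rw [if_pos hfit] at hstep
      by_cases hpos : 0 < G
      · simp only [if_pos hpos] at hstep
        rw [pv_slice_take _ _ hfit.1, List.take_take] at hstep
        obtain ⟨c2, hres, hle, horig, hprops⟩ := ih hgood' (min G.toNat c) (by omega)
        refine ⟨c2, by rw [hstep]; exact hres, by omega, ?_, ?_⟩
        · rcases horig with h | ⟨m', hm', hp', he'⟩
          · by_cases hgc : G.toNat < c
            · exact Or.inr ⟨m, List.mem_cons_self, hpos, by omega⟩
            · exact Or.inl (by omega)
          · exact Or.inr ⟨m', List.mem_cons_of_mem _ hm', hp', he'⟩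
        · intro m'' hmem hp
          rcases List.mem_cons.mp hmem with rfl | hmem'
          · omega
          · exact hprops m'' hmem' hp
      · simp only [if_neg hpos] at hstep
        obtain ⟨c2, hres, hle, horig, hprops⟩ := ih hgood' c hc
        refine ⟨c2, by rw [hstep]; exact hres, hle, ?_, ?_⟩
        · rcases horig with h | ⟨m', hm', hp', he'⟩
          · exact Or.inl h
          · exact Or.inr ⟨m', List.mem_cons_of_mem _ hm', hp', he'⟩
        · intro m'' hmem hp
          rcases List.mem_cons.mp hmem with rfl | hmem'
          · exact absurd hp hpos
          · exact hprops m'' hmem' hp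
    · rw [if_neg hfit] at hstep
      norm_num at hstep
      obtain ⟨c2, hres, hle, horig, hprops⟩ := ih hgood' c hc
      refine ⟨c2, by rw [hstep]; exact hres, hle, ?_, ?_⟩
      · rcases horig with h | ⟨m', hm', hp', he'⟩
        · exact Or.inl h
        · exact Or.inr ⟨m', List.mem_cons_of_mem _ hm', hp', he'⟩
      · intro m'' hmem hp
        rcases List.mem_cons.mp hmem with rfl | hmem'
        · -- no straddle is possible here
          have h0 : (0:Int) ≤ G := le_of_lt hp
          have hnofit : c1 < G.toNat + m''.length := by
            by_contra hcon
            exact hfit ⟨h0, by omega⟩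
          by_cases hcf : c1 ≤ G.toNat
          · omega
          · exfalso
            obtain ⟨hocc, hmin⟩ := PySem.Chars.find_spec h0
            have hGle := PySem.Chars.find_le_length (PySem.Chars.lower t) m''
            rw [pv_lower_length] at hGle
            have hlen : G.toNat + m''.length ≤ t.length := by
              have := pv_occ_len (PySem.Chars.lower t) m'' G.toNat
                (by rw [pv_lower_length]; omega) hocc
              rw [pv_lower_length] at this
              omega
            have hbc : t.getD c1 ' ' = '\n' := by
              rcases hb with h | h
              · omega
              · exact h
            have hlc : (PySem.Chars.lower t).getD c1 ' ' = '\n' :=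
              pv_lower_getD_nl t c1 (by omega) hbc
            have hk0 : (PySem.Chars.lower t).getD (G.toNat + (c1 - G.toNat)) ' ' =
                m''.getD (c1 - G.toNat) ' ' :=
              pv_occ_getD (PySem.Chars.lower t) m'' G.toNat (c1 - G.toNat) hocc (by omega)
            have he : G.toNat + (c1 - G.toNat) = c1 := by omega
            rw [he, hlc] at hk0
            exact hmnl (c1 - G.toNat) (by omega) (by omega) hk0.symm
        · exact hprops m'' hmem' hp

lemma pv_main (t : List Char) :
    PySem.Chars.strip (pvCiFoldC (PySem.Chars.lower (pvCutFoldC pvCutMarkersC t)) pvCiMarkersC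
        (pvCutFoldC pvCutMarkersC t)) =
    PySem.Chars.strip
      (match PySem.List.min?
          ((pvCutMarkersC.map (fun m => PySem.Chars.find t m) ++
            pvCiMarkersC.map (fun m => PySem.Chars.find (PySem.Chars.lower t) m)).filter
            (fun i => 0 < i)) (fun x => x) with
       | some c => PySem.Chars.slice t none (some c)
       | none => t) := by
  obtain ⟨c1, hA1, hc1le, hb1, horig1, hprops1⟩ :=
    pv_cutFold_spec t pvCutMarkersC t.length pvGoodExact_all (le_refl _) (Or.inl rfl)
  rw [List.take_length] at hA1
  have hlow : PySem.Chars.lower (pvCutFoldC pvCutMarkersC t) = (PySem.Chars.lower t).take c1 := by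
    rw [hA1, PySem.Chars.lower, PySem.Chars.lower, List.map_take]
  obtain ⟨c2, hA2, hc2le, horig2, hprops2⟩ :=
    pv_ciFold_spec t c1 hc1le hb1 pvCiMarkersC pvGoodCi_all c1 (le_refl _)
  rw [hlow, hA1, hA2]
  set C := ((pvCutMarkersC.map (fun m => PySem.Chars.find t m) ++
      pvCiMarkersC.map (fun m => PySem.Chars.find (PySem.Chars.lower t) m)).filter
      (fun i => 0 < i)) with hC
  cases hmin : PySem.List.min? C (fun x => x) with
  | none =>
    rw [PySem.List.min?_eq_none_iff] at hmin
    have hnone : ∀ x ∈ (pvCutMarkersC.map (fun m => PySem.Chars.find t m) ++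
        pvCiMarkersC.map (fun m => PySem.Chars.find (PySem.Chars.lower t) m)), ¬ (0:Int) < x := by
      intro x hx hpos
      have : x ∈ C := by
        rw [hC, List.mem_filter]
        exact ⟨hx, by simpa using hpos⟩
      rw [hmin] at this
      simp at this
    have hc1 : c1 = t.length := by
      rcases horig1 with h | ⟨m, hm, hp, _⟩
      · exact h
      · exact absurd hp (hnone _ (List.mem_append_left _ (List.mem_map_of_mem hm)))
    have hc2 : c2 = c1 := by
      rcases horig2 with h | ⟨m, hm, hp, _⟩
      · exact h
      · exact absurd hp (hnone _ (List.mem_append_right _ (List.mem_map_of_mem hm)))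
    rw [hc2, hc1, List.take_length]
  | some cmin =>
    have hmem := PySem.List.min?_mem hmin
    have hpos : (0:Int) < cmin := by
      rw [hC, List.mem_filter] at hmem
      simpa using hmem.2
    have hmem' := (List.mem_filter.mp (hC ▸ hmem)).1
    -- cmin ≤ every positive candidate
    have hminle : ∀ x ∈ (pvCutMarkersC.map (fun m => PySem.Chars.find t m) ++
        pvCiMarkersC.map (fun m => PySem.Chars.find (PySem.Chars.lower t) m)),
        (0:Int) < x → cmin ≤ x := by
      intro x hx hp
      exact PySem.List.min?_isMin hmin x (by rw [hC, List.mem_filter]; exact ⟨hx, by simpa using hp⟩)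
    have hminlen : cmin ≤ (t.length : Int) := by
      rcases List.mem_append.mp hmem' with h | h
      · obtain ⟨m, hm, rfl⟩ := List.mem_map.mp h
        exact PySem.Chars.find_le_length t m
      · obtain ⟨m, hm, rfl⟩ := List.mem_map.mp h
        have := PySem.Chars.find_le_length (PySem.Chars.lower t) m
        rwa [pv_lower_length] at this
    -- B cuts at cmin.toNat
    show PySem.Chars.strip (List.take c2 t) =
      PySem.Chars.strip (PySem.Chars.slice t none (some cmin))
    rw [pv_slice_take _ _ (le_of_lt hpos)]
    -- cmin.toNat ≤ c2
    have hle1 : cmin.toNat ≤ c2 := by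
      rcases horig2 with h2 | ⟨m, hm, hp, he⟩
      · rcases horig1 with h1 | ⟨m, hm, hp, he⟩
        · omega
        · have := hminle _ (List.mem_append_left _ (List.mem_map_of_mem hm)) hp
          omega
      · have := hminle _ (List.mem_append_right _ (List.mem_map_of_mem hm)) hp
        omega
    -- either equal or the removed segment is all newlines
    have hseg : c2 ≤ cmin.toNat ∨
        ∀ i, cmin.toNat ≤ i → i < c2 → t.getD i ' ' = '\n' := by
      rcases List.mem_append.mp hmem' with h | h
      · obtain ⟨m, hm, he⟩ := List.mem_map.mp h
        rcases hprops1 m hm (by omega) with h' | h'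
        · left; omega
        · right; intro i hi1 hi2
          exact h' i (by omega) (by omega)
      · obtain ⟨m, hm, he⟩ := List.mem_map.mp h
        have := hprops2 m hm (by omega)
        left; omega
    rcases hseg with h | h
    · have : c2 = cmin.toNat := by omega
      rw [this]
    · have h' : cmin.toNat + (c2 - cmin.toNat) = c2 := by omega
      set n := c2 - cmin.toNat with hn
      rw [← h', List.take_add]
      apply pv_strip_append
      intro ch hch
      obtain ⟨j, hj, hjv⟩ := List.mem_iff_getElem.mp hch
      have hjlen : j < (t.drop cmin.toNat).length := by
        have h2 : ((t.drop cmin.toNat).take n).length ≤ (t.drop cmin.toNat).length := by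
          simp [List.length_take]
        omega
      have hj2 : j < n := by
        have h2 : ((t.drop cmin.toNat).take n).length ≤ n := by
          simp [List.length_take]
        omega
      rw [List.getElem_take, List.getElem_drop] at hjv
      have hin : cmin.toNat + j < t.length := by
        simp [List.length_drop] at hjlen
        omega
      have hnl := h (cmin.toNat + j) (by omega) (by omega)
      rw [List.getD_eq_getElem _ _ hin] at hnl
      rw [← hjv, hnl]
      decide

lemma pv_cut_bridge (L : List String) (s : String) :
    (L.foldl (fun s m =>
        let idx := PySem.Str.find s m
        if 0 < idx then PySem.Str.slice s none (some idx) else s) s).toList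
    = pvCutFoldC (L.map String.toList) s.toList := by
  induction L generalizing s with
  | nil => rfl
  | cons m L ih =>
    rw [List.foldl_cons, ih]
    have hrhs : pvCutFoldC ((m :: L).map String.toList) s.toList =
        pvCutFoldC (L.map String.toList)
          (let idx := PySem.Chars.find s.toList m.toList
           if 0 < idx then PySem.Chars.slice s.toList none (some idx) else s.toList) := rfl
    rw [hrhs]
    congr 1
    show (if 0 < PySem.Str.find s m then PySem.Str.slice s none (some (PySem.Str.find s m))
        else s).toList =
      if 0 < PySem.Chars.find s.toList m.toList
      then PySem.Chars.slice s.toList none (some (PySem.Chars.find s.toList m.toList))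
      else s.toList
    rw [PySem.Str.find_eq]
    split_ifs with hp
    · rw [PySem.Str.toList_slice]
    · rfl

lemma pv_ci_bridge (tl : String) (L : List String) (s : String) :
    (L.foldl (fun s m =>
        let idx := PySem.Str.find tl m
        if 0 < idx then PySem.Str.slice s none (some idx) else s) s).toList
    = pvCiFoldC tl.toList (L.map String.toList) s.toList := by
  induction L generalizing s with
  | nil => rfl
  | cons m L ih =>
    rw [List.foldl_cons, ih]
    have hrhs : pvCiFoldC tl.toList ((m :: L).map String.toList) s.toList =
        pvCiFoldC tl.toList (L.map String.toList)
          (let idx := PySem.Chars.find tl.toList m.toList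
           if 0 < idx then PySem.Chars.slice s.toList none (some idx) else s.toList) := rfl
    rw [hrhs]
    congr 1
    show (if 0 < PySem.Str.find tl m then PySem.Str.slice s none (some (PySem.Str.find tl m))
        else s).toList =
      if 0 < PySem.Chars.find tl.toList m.toList
      then PySem.Chars.slice s.toList none (some (PySem.Chars.find tl.toList m.toList))
      else s.toList
    rw [PySem.Str.find_eq]
    split_ifs with hp
    · rw [PySem.Str.toList_slice]
    · rfl

lemma pv_cands_bridge (t1 : String) :
    pvCutMarkers.map (fun m => PySem.Str.find t1 m) ++
      pvCiMarkers.map (fun m => PySem.Str.find (PySem.Str.lower t1) m) =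
    pvCutMarkersC.map (fun m => PySem.Chars.find t1.toList m) ++
      pvCiMarkersC.map (fun m => PySem.Chars.find (PySem.Chars.lower t1.toList) m) := by
  simp only [pvCutMarkersC, pvCiMarkersC, List.map_map, PySem.Str.find_eq,
    PySem.Str.toList_lower, Function.comp_def]


theorem clean_generated_text_eq (text : String) :
    clean_generated_text text = clean_generated_text_alt text := by
  by_cases h : text = ""
  · subst h
    set_option maxRecDepth 4096 in decide
  · unfold clean_generated_text clean_generated_text_alt
    rw [if_neg h]
    set t1 := pvArtifacts.foldl (fun s a => PySem.Str.replace s a "") text with ht1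
    show PySem.Str.strip
        (pvCiMarkers.foldl (fun s m =>
          let idx := PySem.Str.find (PySem.Str.lower (pvCutMarkers.foldl (fun s m =>
            let idx := PySem.Str.find s m
            if 0 < idx then PySem.Str.slice s none (some idx) else s) t1)) m
          if 0 < idx then PySem.Str.slice s none (some idx) else s)
          (pvCutMarkers.foldl (fun s m =>
            let idx := PySem.Str.find s m
            if 0 < idx then PySem.Str.slice s none (some idx) else s) t1)) =
      PySem.Str.strip
        (match PySem.List.min? ((pvCutMarkers.map (fun m => PySem.Str.find t1 m) ++
            pvCiMarkers.map (fun m => PySem.Str.find (PySem.Str.lower t1) m)).filter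
            (fun i => 0 < i)) (fun x => x) with
         | some c => PySem.Str.slice t1 none (some c)
         | none => t1)
    apply String.toList_inj.mp
    rw [PySem.Str.toList_strip, PySem.Str.toList_strip, pv_ci_bridge, pv_cut_bridge,
      PySem.Str.toList_lower, pv_cut_bridge]
    have e1 : List.map String.toList pvCutMarkers = pvCutMarkersC := rfl
    have e2 : List.map String.toList pvCiMarkers = pvCiMarkersC := rfl
    rw [e1, e2, pv_cands_bridge t1]
    have hR : (match PySem.List.min? ((pvCutMarkersC.map (fun m => PySem.Chars.find t1.toList m) ++
          pvCiMarkersC.map (fun m => PySem.Chars.find (PySem.Chars.lower t1.toList) m)).filter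
          (fun i => 0 < i)) (fun x => x) with
        | some c => PySem.Str.slice t1 none (some c)
        | none => t1).toList =
        (match PySem.List.min? ((pvCutMarkersC.map (fun m => PySem.Chars.find t1.toList m) ++
          pvCiMarkersC.map (fun m => PySem.Chars.find (PySem.Chars.lower t1.toList) m)).filter
          (fun i => 0 < i)) (fun x => x) with
        | some c => PySem.Chars.slice t1.toList none (some c)
        | none => t1.toList) := by
      cases PySem.List.min? ((pvCutMarkersC.map (fun m => PySem.Chars.find t1.toList m) ++
          pvCiMarkersC.map (fun m => PySem.Chars.find (PySem.Chars.lower t1.toList) m)).filter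
          (fun i => 0 < i)) (fun x => x) with
      | none => rfl
      | some c => exact PySem.Str.toList_slice t1 none (some c)
    rw [hR]
    exact pv_main t1.toList

-- ===== VERDICT (by name: the statement is the Claim_ definition above) =====
theorem clean_generated_text_spec : Claim_equal_clean_generated_text := by
  intro text _
  unfold Spec_clean_generated_text
  exact clean_generated_text_eq text
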